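-- pv_equiv track=rewrite | github.com/brunorijsman/rift-python | rift/node.py | left_shift_circular_16
-- ===== SOURCE A (Python) =====
-- def left_shift_circular_16(number, shift):
--     assert 0 <= number <= 0xffff
--     for _count in range(0, shift):
--         number <<= 1
--         if number & 0x10000:
--             number &= 0xffff
--             number |= 0x0001
--     return number
-- ===== SOURCE B (Python) =====
-- def left_shift_circular_16(number, shift):
--     s = shift % 16 if shift > 0 else 0
--     t = number * 2 ** s
--     return t % 0x10000 + t // 0x10000
-- ===== Notes on version B (the rewrite author's own statement) =====
-- stated objective: faster
-- what changed: Replaced the shift-times bit-by-bit rotation loop with an O(1) closed form: multiply by 2^(shift mod 16) and fold the overflow above 2^16 back into the low bits.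
import Mathlib
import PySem

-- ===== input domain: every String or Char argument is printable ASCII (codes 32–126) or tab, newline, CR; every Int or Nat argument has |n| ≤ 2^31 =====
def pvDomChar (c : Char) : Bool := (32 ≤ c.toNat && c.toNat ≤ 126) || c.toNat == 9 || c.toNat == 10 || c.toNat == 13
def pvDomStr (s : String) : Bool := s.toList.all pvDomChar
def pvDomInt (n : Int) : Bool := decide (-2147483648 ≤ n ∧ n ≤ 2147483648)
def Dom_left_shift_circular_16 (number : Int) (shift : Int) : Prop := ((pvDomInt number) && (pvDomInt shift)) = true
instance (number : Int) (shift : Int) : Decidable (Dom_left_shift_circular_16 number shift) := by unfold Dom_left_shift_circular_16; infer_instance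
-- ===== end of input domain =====

-- B replaces A's O(shift) bit-by-bit rotation loop by an O(1) closed form:
-- rotate = (number * 2^(shift mod 16)) split at 2^16 and the halves added back together.


-- ===== PORT A =====
-- one iteration of A's loop body: number <<= 1; if number & 0x10000: number &= 0xffff; number |= 0x0001
def lscStep (n : Int) : Int :=
  let n1 := n <<< (1 : Int)
  if PySem.Int.band n1 0x10000 ≠ 0 then
    PySem.Int.bor (PySem.Int.band n1 0xffff) 0x0001
  else n1

def left_shift_circular_16 (number : Int) (shift : Int) : Int :=
  (PySem.List.pyRange 0 shift 1).foldl (fun n _count => lscStep n) number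

-- ===== PORT B =====
def left_shift_circular_16_alt (number : Int) (shift : Int) : Int :=
  let s : Int := if shift > 0 then PySem.Int.mod shift 16 else 0
  let t : Int := number * 2 ^ s.toNat   -- 2 ** s; exact since s ≥ 0 always holds here
  PySem.Int.mod t 0x10000 + PySem.Int.floordiv t 0x10000

-- ===== PRECONDITION & SPEC =====
-- Pre_ excludes exactly the inputs on which A's assert fails (AssertionError): number outside [0, 0xffff].
def Pre_left_shift_circular_16 (number : Int) (shift : Int) : Prop :=
  0 ≤ number ∧ number ≤ 0xffff
instance (number : Int) (shift : Int) : Decidable (Pre_left_shift_circular_16 number shift) := by unfold Pre_left_shift_circular_16; infer_instance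

def pvWitness_left_shift_circular_16 : Int × Int := (40000, 23)

def Spec_left_shift_circular_16 (number : Int) (shift : Int) (out : Int) : Prop := out = left_shift_circular_16_alt number shift
instance (number : Int) (shift : Int) (out : Int) : Decidable (Spec_left_shift_circular_16 number shift out) := by unfold Spec_left_shift_circular_16; infer_instance

-- ===== CLAIM (what is proved, stated in full; the proofs are below) =====
def Claim_equal_left_shift_circular_16 : Prop := ∀ (number : Int) (shift : Int), Dom_left_shift_circular_16 number shift → Pre_left_shift_circular_16 number shift → Spec_left_shift_circular_16 number shift (left_shift_circular_16 number shift)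

-- ===== LEMMAS AND PROOFS =====

-- the closed rotation form: multiply by 2^s, fold the overflow above 2^16 back in
def lscRot (n : Int) (s : Nat) : Int := (n * 2 ^ s) % 65536 + (n * 2 ^ s) / 65536

lemma lor_even (k : Nat) : (2 * k) ||| 1 = 2 * k + 1 := by
  have h := Nat.lor_bit false k true 0
  simp [Nat.bit] at h
  omega

lemma and_65535 (m : Nat) : (m &&& 65535) = m % 65536 := by
  have := Nat.and_two_pow_sub_one_eq_mod m 16
  norm_num at this; omega

lemma and_65536 (m : Nat) (h : m < 131072) : (m &&& 65536) = if 65536 ≤ m then 65536 else 0 := by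
  have h2 := Nat.and_two_pow m 16
  norm_num at h2
  rw [h2]
  rcases Nat.lt_or_ge m 65536 with h1 | h1 <;>
    simp [Nat.testBit, Nat.shiftRight_eq_div_pow, Nat.div_eq_of_lt, *] <;>
  · have : m / 65536 = 1 := by omega
    simp [this]

lemma step_arith (m : Int) (h0 : 0 ≤ m) (h1 : m < 65536) :
    lscStep m = (2 * m) % 65536 + (2 * m) / 65536 := by
  unfold lscStep
  obtain ⟨k, rfl⟩ := Int.eq_ofNat_of_zero_le h0
  have hk : k < 65536 := by exact_mod_cast h1
  rw [show ((1:Int)) = ((1:Nat):Int) from rfl, Int.shiftLeft_eq_mul_pow]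
  norm_num
  have e1 : (k : Int) * 2 = ((2 * k : Nat) : Int) := by push_cast; ring
  rw [e1,
      show ((0x10000 : Int) = ((0x10000 : Nat) : Int)) from rfl,
      show ((0xffff : Int) = ((0xffff : Nat) : Int)) from rfl,
      show ((0x0001 : Int) = ((0x0001 : Nat) : Int)) from rfl,
      PySem.Int.band_natCast, PySem.Int.band_natCast, PySem.Int.bor_natCast,
      and_65535, and_65536 (2*k) (by omega)]
  rcases Nat.lt_or_ge (2*k) 65536 with h2 | h2
  · simp [Nat.not_le.mpr h2]
    omega
  · rw [if_pos h2]
    have he : (2*k) % 65536 = 2 * (k - 32768) := by omega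
    rw [he, lor_even]
    omega

lemma rot_bounds (n : Int) (s : Nat) (h0 : 0 ≤ n) (h1 : n < 65536) (hs : s ≤ 16) :
    0 ≤ lscRot n s ∧ lscRot n s < 65536 := by
  unfold lscRot
  interval_cases s <;> norm_num <;> omega

lemma rot_succ (n : Int) (s : Nat) (h0 : 0 ≤ n) (h1 : n < 65536) (hs : s ≤ 15) :
    lscStep (lscRot n s) = lscRot n (s + 1) := by
  obtain ⟨hb0, hb1⟩ := rot_bounds n s h0 h1 (by omega)
  rw [step_arith _ hb0 hb1]
  unfold lscRot
  interval_cases s <;> norm_num <;> omega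

lemma rot_16 (n : Int) (h0 : 0 ≤ n) (h1 : n < 65536) : lscRot n 16 = lscRot n 0 := by
  unfold lscRot
  norm_num
  omega

lemma iterate_rot (n : Int) (h0 : 0 ≤ n) (h1 : n < 65536) (k : Nat) :
    lscStep^[k] n = lscRot n (k % 16) := by
  induction k with
  | zero =>
    simp [lscRot]
    omega
  | succ k ih =>
    rw [Function.iterate_succ_apply', ih, rot_succ n (k % 16) h0 h1 (by omega)]
    rcases Nat.lt_or_ge (k % 16) 15 with h | h
    · congr 1
      omega
    · have h15 : k % 16 = 15 := by omega
      rw [h15, rot_16 n h0 h1]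
      congr 1
      omega

lemma foldl_iterate (l : List Int) (n : Int) :
    l.foldl (fun n _count => lscStep n) n = lscStep^[l.length] n := by
  induction l generalizing n with
  | nil => rfl
  | cons a t ih => simp [List.foldl, ih, Function.iterate_succ_apply]

-- ===== VERDICT (by name: the statement is the Claim_ definition above) =====
theorem left_shift_circular_16_spec : Claim_equal_left_shift_circular_16 := by
  intro number shift _hdom hpre
  obtain ⟨h0, h1⟩ := hpre
  have h1' : number < 65536 := by omega
  unfold Spec_left_shift_circular_16 left_shift_circular_16 left_shift_circular_16_alt
  rw [foldl_iterate, PySem.List.length_pyRange_one, iterate_rot number h0 h1']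
  rcases lt_or_ge (0:Int) shift with hs | hs
  · rw [if_pos hs]
    show lscRot number ((shift - 0).toNat % 16)
        = PySem.Int.mod (number * 2 ^ (PySem.Int.mod shift 16).toNat) 65536
          + PySem.Int.floordiv (number * 2 ^ (PySem.Int.mod shift 16).toNat) 65536
    rw [PySem.Int.mod_eq_emod_of_pos (by norm_num), PySem.Int.mod_eq_emod_of_pos (by norm_num),
        PySem.Int.floordiv_eq_ediv_of_pos (by norm_num)]
    have ht : (shift % 16).toNat = (shift - 0).toNat % 16 := by omega
    rw [ht]
    rfl
  · rw [if_neg (by omega)]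
    show lscRot number ((shift - 0).toNat % 16)
        = PySem.Int.mod (number * 2 ^ (0:Int).toNat) 65536
          + PySem.Int.floordiv (number * 2 ^ (0:Int).toNat) 65536
    rw [PySem.Int.mod_eq_emod_of_pos (by norm_num),
        PySem.Int.floordiv_eq_ediv_of_pos (by norm_num)]
    have ht : (shift - 0).toNat % 16 = (0:Int).toNat := by omega
    rw [ht]
    rfl
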